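-- pv_equiv track=rewrite | github.com/miethe/MeatyMusic | services/api/app/skills/lyrics.py | _parse_rhyme_scheme
-- ===== SOURCE A (Python) =====
-- from typing import Any, Dict, List
--
-- def _parse_rhyme_scheme(scheme: str) -> List[tuple[int, int]]:
--     """Convert rhyme scheme string to line pair indices.
--
--     Args:
--         scheme: Rhyme pattern (e.g., "AABB", "ABAB", "ABCB")
--
--     Returns:
--         List of (line_i, line_j) pairs that should rhyme
--
--     Examples:
--         >>> _parse_rhyme_scheme("AABB")
--         [(0, 1), (2, 3)]
--         >>> _parse_rhyme_scheme("ABAB")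
--         [(0, 2), (1, 3)]
--         >>> _parse_rhyme_scheme("ABCB")
--         [(1, 3)]
--     """
--     pairs = []
--     positions: Dict[str, int] = {}
--
--     for i, char in enumerate(scheme.upper()):
--         if char in positions:
--             # Found matching rhyme letter - create pair
--             pairs.append((positions[char], i))
--         else:
--             # First occurrence of this letter
--             positions[char] = i
--
--     return pairs
-- ===== SOURCE B (Python) =====
-- def _parse_rhyme_scheme(scheme):
--     """Group positions by letter once, emit (first, later) pairs per group,
--     then sort by the later index to recover chronological order."""
--     positions = {}
--     for i, ch in enumerate(scheme.upper()):
--         positions.setdefault(ch, []).append(i)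
--     pairs = []
--     for ps in positions.values():
--         first = ps[0]
--         pairs.extend((first, j) for j in ps[1:])
--     pairs.sort(key=lambda p: p[1])
--     return pairs
-- ===== Notes on version B (the rewrite author's own statement) =====
-- stated objective: alternative
-- what changed: Instead of one scan that pairs each repeated letter against a first-occurrence dict as it goes, B builds a dict from each letter to its full position list in one pass, emits (first, later) pairs per group, and sorts the pairs by their second index to recover the chronological order.
import Mathlib
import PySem

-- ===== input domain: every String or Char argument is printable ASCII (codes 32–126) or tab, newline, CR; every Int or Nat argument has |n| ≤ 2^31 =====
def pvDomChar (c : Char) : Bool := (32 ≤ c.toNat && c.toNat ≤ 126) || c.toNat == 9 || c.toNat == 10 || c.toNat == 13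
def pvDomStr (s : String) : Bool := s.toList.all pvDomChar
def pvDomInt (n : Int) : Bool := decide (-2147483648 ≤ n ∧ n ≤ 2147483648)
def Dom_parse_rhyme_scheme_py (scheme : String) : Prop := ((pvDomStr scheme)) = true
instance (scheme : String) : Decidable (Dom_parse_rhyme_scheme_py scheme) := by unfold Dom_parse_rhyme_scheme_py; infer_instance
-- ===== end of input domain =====

-- B groups positions by letter and emits pairs per group, then sorts by the
-- later index; A pairs on the fly against a first-occurrence dict. Same value,
-- different decomposition (objective: alternative).

-- ===== PORT A =====
-- the loop body of A: (pairs, positions) updated at one (i, char)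
def pvStepA (st : List (Int × Int) × PySem.Dict Char Int) (p : Int × Char) :
    List (Int × Int) × PySem.Dict Char Int :=
  match st.2.get? p.2 with
  | some q => (st.1 ++ [(q, p.1)], st.2)
  | none => (st.1, st.2.insert p.2 p.1)

def parse_rhyme_scheme_py (scheme : String) : List (Int × Int) :=
  ((PySem.List.enumerate (PySem.Str.upper scheme).toList 0).foldl pvStepA
    ([], PySem.Dict.empty)).1

-- ===== PORT B =====
-- pairs emitted by one group: (ps[0], ps[k]) for k ≥ 1
def pvTailPairs (ps : List Int) : List (Int × Int) :=
  match ps with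
  | [] => []
  | f :: rest => rest.map (fun j => (f, j))

def parse_rhyme_scheme_py_alt (scheme : String) : List (Int × Int) :=
  let positions := (PySem.List.enumerate (PySem.Str.upper scheme).toList 0).foldl
    (fun (d : PySem.Dict Char (List Int)) p => d.modify p.2 [] (· ++ [p.1]))
    PySem.Dict.empty
  let pairs := positions.values.flatMap pvTailPairs
  PySem.List.sorted pairs (fun p => p.2) false

-- ===== PRECONDITION & SPEC =====
def Spec_parse_rhyme_scheme_py (scheme : String) (out : List (Int × Int)) : Prop := out = parse_rhyme_scheme_py_alt scheme
instance (scheme : String) (out : List (Int × Int)) : Decidable (Spec_parse_rhyme_scheme_py scheme out) := by unfold Spec_parse_rhyme_scheme_py; infer_instance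

-- ===== CLAIM (what is proved, stated in full; the proofs are below) =====
def Claim_equal_parse_rhyme_scheme_py : Prop := ∀ (scheme : String), Dom_parse_rhyme_scheme_py scheme → Spec_parse_rhyme_scheme_py scheme (parse_rhyme_scheme_py scheme)

-- ===== LEMMAS AND PROOFS =====

-- the pairs A emits while scanning e with first-occurrence dict d
def pvEmit (d : PySem.Dict Char Int) : List (Int × Char) → List (Int × Int)
  | [] => []
  | p :: rest =>
    match d.get? p.2 with
    | some q => (q, p.1) :: pvEmit d rest
    | none => pvEmit (d.insert p.2 p.1) rest

-- the first-occurrence dict after scanning e from d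
def pvFD (d : PySem.Dict Char Int) : List (Int × Char) → PySem.Dict Char Int
  | [] => d
  | p :: rest =>
    match d.get? p.2 with
    | some _ => pvFD d rest
    | none => pvFD (d.insert p.2 p.1) rest

-- B's group table, in closed form
def pvG (e : List (Int × Char)) : List (Int × Int) :=
  (PySem.Set.ofList (e.map (·.2))).flatMap
    (fun c => pvTailPairs ((e.filter (fun p => p.2 == c)).map (·.1)))

theorem pvFoldA (e : List (Int × Char)) (pairs : List (Int × Int))
    (d : PySem.Dict Char Int) :
    e.foldl pvStepA (pairs, d) = (pairs ++ pvEmit d e, pvFD d e) := by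
  induction e generalizing pairs d with
  | nil => simp [pvEmit, pvFD]
  | cons p rest ih =>
    simp only [List.foldl_cons, pvStepA, pvEmit, pvFD]
    cases h : d.get? p.2 <;> simp [ih]

theorem pvEmit_append (d : PySem.Dict Char Int) (e : List (Int × Char)) (x : Int × Char) :
    pvEmit d (e ++ [x]) = pvEmit d e ++
      (match (pvFD d e).get? x.2 with
       | some q => [(q, x.1)]
       | none => []) := by
  induction e generalizing d with
  | nil =>
    simp only [List.nil_append, pvFD]
    cases h : d.get? x.2 <;> simp [pvEmit, h]
  | cons p rest ih =>
    simp only [List.cons_append, pvEmit, pvFD]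
    cases h : d.get? p.2 <;> simp [ih]

theorem pvFD_get (d : PySem.Dict Char Int) (e : List (Int × Char)) (c : Char) :
    (pvFD d e).get? c =
      (d.get? c).or (((e.filter (fun p => p.2 == c)).map (·.1)).head?) := by
  induction e generalizing d with
  | nil => simp [pvFD]
  | cons p rest ih =>
    simp only [pvFD]
    cases h : d.get? p.2 with
    | some q =>
      rw [ih]
      by_cases hc : p.2 = c
      · subst hc; simp [h]
      · simp [hc]
    | none =>
      rw [ih]
      by_cases hc : p.2 = c
      · subst hc; simp [h, PySem.Dict.get?_insert_self]
      · rw [PySem.Dict.get?_insert_of_ne d p.1 (fun hh => hc hh.symm)]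
        simp [hc]

theorem pvEmit_snd_mem (d : PySem.Dict Char Int) (e : List (Int × Char)) :
    ∀ y ∈ pvEmit d e, y.2 ∈ e.map (·.1) := by
  induction e generalizing d with
  | nil => simp [pvEmit]
  | cons p rest ih =>
    intro y hy
    simp only [pvEmit] at hy
    simp only [List.map_cons, List.mem_cons]
    cases h : d.get? p.2 with
    | some q =>
      rw [h] at hy
      rcases List.mem_cons.mp hy with hy | hy
      · left; simp [hy]
      · right; exact ih d y hy
    | none =>
      rw [h] at hy
      right; exact ih _ y hy

theorem pvEmit_pairwise (d : PySem.Dict Char Int) (e : List (Int × Char))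
    (he : e.Pairwise (fun p q => p.1 < q.1)) :
    (pvEmit d e).Pairwise (fun a b => a.2 < b.2) := by
  induction e generalizing d with
  | nil => simp [pvEmit]
  | cons p rest ih =>
    rcases List.pairwise_cons.mp he with ⟨hp, hrest⟩
    simp only [pvEmit]
    cases h : d.get? p.2 with
    | some q =>
      refine List.pairwise_cons.mpr ⟨?_, ih d hrest⟩
      intro b hb
      have := pvEmit_snd_mem d rest b hb
      simp only [List.mem_map] at this
      rcases this with ⟨r, hr, hrb⟩
      simpa [hrb] using hp r hr
    | none => exact ih _ hrest

-- flatMap over nodup keys with one group extended by one element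
theorem pvFlatMap_extend {α : Type} [DecidableEq α] (K : List α) (c0 : α)
    (f f' : α → List (Int × Int)) (y : Int × Int)
    (hnd : K.Nodup) (hc : c0 ∈ K)
    (hf : ∀ c, f' c = if c = c0 then f c ++ [y] else f c) :
    (K.flatMap f').Perm (K.flatMap f ++ [y]) := by
  induction K with
  | nil => simp at hc
  | cons k rest ih =>
    rcases List.nodup_cons.mp hnd with ⟨hk, hndr⟩
    simp only [List.flatMap_cons]
    by_cases hkc : k = c0
    · subst hkc
      have hrest : rest.flatMap f' = rest.flatMap f := by
        refine List.flatMap_congr (fun c hcr => ?_)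
        rw [hf c, if_neg]; rintro rfl; exact hk hcr
      rw [hf k, if_pos rfl, hrest, List.append_assoc, List.append_assoc]
      exact List.Perm.append_left _ List.perm_append_comm
    · have hcr : c0 ∈ rest := by
        rcases List.mem_cons.mp hc with h | h
        · exact absurd h.symm hkc
        · exact h
      rw [hf k, if_neg hkc, List.append_assoc]
      exact List.Perm.append_left _ (ih hndr hcr)

theorem pvTailPairs_append (ps : List Int) (j f : Int) (h : ps.head? = some f) :
    pvTailPairs (ps ++ [j]) = pvTailPairs ps ++ [(f, j)] := by
  cases ps with
  | nil => simp at h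
  | cons a rest =>
    simp only [List.head?_cons, Option.some.injEq] at h
    subst h
    simp [pvTailPairs]

theorem pvG_perm_emit (e : List (Int × Char)) :
    (pvEmit PySem.Dict.empty e).Perm (pvG e) := by
  induction e using List.reverseRecOn with
  | nil => simp [pvEmit, pvG, PySem.Set.ofList]
  | append_singleton e x ih =>
    have hemit := pvEmit_append PySem.Dict.empty e x
    have hget := pvFD_get PySem.Dict.empty e x.2
    have hK : PySem.Set.ofList ((e ++ [x]).map (·.2))
        = PySem.Set.add (PySem.Set.ofList (e.map (·.2))) x.2 := by
      simp [PySem.Set.ofList_eq_foldl, List.foldl_append]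
    by_cases hmem : x.2 ∈ e.map (·.2)
    · -- letter already seen: both sides gain one pair (first, x.1)
      have hfilter_ne : (e.filter (fun p => p.2 == x.2)).map (·.1) ≠ [] := by
        simp only [List.mem_map] at hmem
        rcases hmem with ⟨p, hp, hps⟩
        have : p ∈ e.filter (fun p => p.2 == x.2) := by
          simp [List.mem_filter, hp, hps]
        intro hnil
        simp only [List.map_eq_nil_iff] at hnil
        simp [hnil] at this
      obtain ⟨f, hf⟩ : ∃ f, ((e.filter (fun p => p.2 == x.2)).map (·.1)).head? = some f := by
        cases hh : ((e.filter (fun p => p.2 == x.2)).map (·.1)).head? with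
        | none => exact absurd (List.head?_eq_none_iff.mp hh) hfilter_ne
        | some f => exact ⟨f, rfl⟩
      have hgetf : (pvFD PySem.Dict.empty e).get? x.2 = some f := by
        rw [hget, hf, PySem.Dict.get?_empty]; rfl
      have hKeq : PySem.Set.add (PySem.Set.ofList (e.map (·.2))) x.2
          = PySem.Set.ofList (e.map (·.2)) := by
        have : x.2 ∈ PySem.Set.ofList (e.map (·.2)) := (PySem.Set.mem_ofList _ _).mpr hmem
        simp [PySem.Set.add, this]
      have hstepG : (pvG (e ++ [x])).Perm (pvG e ++ [(f, x.1)]) := by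
        unfold pvG
        rw [hK, hKeq]
        apply pvFlatMap_extend _ x.2 _ _ _ (PySem.Set.nodup_ofList _)
          (by simpa [PySem.Set.mem_ofList] using hmem)
        intro c
        by_cases hc : c = x.2
        · rw [if_pos hc, hc, List.filter_append,
            show List.filter (fun p => p.2 == x.2) [x] = [x] by simp [List.filter],
            List.map_append]
          exact pvTailPairs_append _ _ _ hf
        · have hcx : (x.2 == c) = false := beq_eq_false_iff_ne.mpr (fun hh => hc hh.symm)
          rw [if_neg hc, List.filter_append,
            show List.filter (fun p => p.2 == c) [x] = [] by simp [List.filter, hcx]]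
          simp
      rw [hemit, hgetf]
      exact ((ih.append (List.Perm.refl [(f, x.1)]))).trans hstepG.symm
    · -- fresh letter: neither side gains a pair
      have hfe : e.filter (fun p => p.2 == x.2) = [] := by
        rw [List.filter_eq_nil_iff]
        intro p hp hps
        exact hmem (by simp only [List.mem_map]; exact ⟨p, hp, by simpa using hps⟩)
      have hgetn : (pvFD PySem.Dict.empty e).get? x.2 = none := by
        rw [hget]
        simp [hfe, PySem.Dict.get?_empty]
      have hKeq : PySem.Set.add (PySem.Set.ofList (e.map (·.2))) x.2
          = PySem.Set.ofList (e.map (·.2)) ++ [x.2] := by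
        have : x.2 ∉ PySem.Set.ofList (e.map (·.2)) := fun h =>
          hmem ((PySem.Set.mem_ofList _ _).mp h)
        simp [PySem.Set.add, this]
      have h1 : ∀ c ∈ PySem.Set.ofList (e.map (·.2)),
          pvTailPairs (((e ++ [x]).filter (fun p => p.2 == c)).map (·.1))
          = pvTailPairs ((e.filter (fun p => p.2 == c)).map (·.1)) := by
        intro c hc
        have hcx : (x.2 == c) = false := beq_eq_false_iff_ne.mpr (by
          intro h
          exact hmem (by simpa [PySem.Set.mem_ofList, h] using hc))
        rw [List.filter_append,
          show List.filter (fun p => p.2 == c) [x] = [] by simp [List.filter, hcx]]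
        simp
      have hG : pvG (e ++ [x]) = pvG e := by
        unfold pvG
        rw [hK, hKeq, List.flatMap_append, List.flatMap_congr (fun c hc => h1 c hc)]
        simp [List.filter_append, hfe, List.filter, pvTailPairs]
      rw [hemit, hgetn, hG]
      simpa using ih

-- B's dict unfolds to the closed-form group table
theorem pvDict_flat (e : List (Int × Char)) :
    (List.foldl (fun (d : PySem.Dict Char (List Int)) p => d.modify p.2 [] (· ++ [p.1]))
      PySem.Dict.empty e).values.flatMap pvTailPairs = pvG e := by
  have hfold : List.foldl (fun (d : PySem.Dict Char (List Int)) p => d.modify p.2 [] (· ++ [p.1]))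
      PySem.Dict.empty e
      = List.foldl (fun (d : PySem.Dict Char (List Int)) p => d.modify p.1 [] (· ++ [p.2]))
          PySem.Dict.empty (e.map (fun p => (p.2, p.1))) := by
    rw [List.foldl_map]
  have hnd : (List.foldl (fun (d : PySem.Dict Char (List Int)) p => d.modify p.2 [] (· ++ [p.1]))
      PySem.Dict.empty e).keys.Nodup :=
    PySem.Dict.nodup_keys_foldl_modify_key e (fun p => p.2) [] (fun _ p ps => ps ++ [p.1])
      PySem.Dict.empty (by simp [PySem.Dict.keys_empty])
  have hkeys : (List.foldl (fun (d : PySem.Dict Char (List Int)) p => d.modify p.2 [] (· ++ [p.1]))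
      PySem.Dict.empty e).keys = PySem.Set.ofList (e.map (·.2)) := by
    simp only [PySem.Dict.keys_foldl_modify_key]
    simp [PySem.Dict.keys_empty, PySem.Set.update, PySem.Set.ofList_eq_foldl]
  have hgetD : ∀ c, (List.foldl (fun (d : PySem.Dict Char (List Int)) p =>
        d.modify p.2 [] (· ++ [p.1])) PySem.Dict.empty e).getD c []
      = (e.filter (fun p => p.2 == c)).map (·.1) := by
    intro c
    rw [hfold, PySem.Dict.getD_foldl_modify_append, List.filter_map]
    simp [PySem.Dict.getD_empty, List.map_map, Function.comp_def]
  rw [PySem.Dict.values_eq_map_keys _ hnd [], List.flatMap_map, hkeys]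
  unfold pvG
  exact List.flatMap_congr (fun c _ => by rw [hgetD c])

theorem pvAlt_eq_sorted_G (scheme : String) :
    parse_rhyme_scheme_py_alt scheme
      = PySem.List.sorted (pvG (PySem.List.enumerate (PySem.Str.upper scheme).toList 0))
          (fun p => p.2) false := by
  have hdef : parse_rhyme_scheme_py_alt scheme
      = PySem.List.sorted
          ((List.foldl (fun (d : PySem.Dict Char (List Int)) p => d.modify p.2 [] (· ++ [p.1]))
            PySem.Dict.empty (PySem.List.enumerate (PySem.Str.upper scheme).toList 0)).values.flatMap
            pvTailPairs)
          (fun p => p.2) false := rfl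
  rw [hdef, pvDict_flat]

-- ===== VERDICT (by name: the statement is the Claim_ definition above) =====
theorem parse_rhyme_scheme_py_spec : Claim_equal_parse_rhyme_scheme_py := by
  intro scheme _
  unfold Spec_parse_rhyme_scheme_py
  rw [pvAlt_eq_sorted_G]
  set e := PySem.List.enumerate (PySem.Str.upper scheme).toList 0 with he
  have hA : parse_rhyme_scheme_py scheme = pvEmit PySem.Dict.empty e := by
    unfold parse_rhyme_scheme_py
    rw [← he, pvFoldA]
    simp
  rw [hA]
  exact (PySem.List.sorted_eq_of_perm_of_pairwise_lt _ _ _ (pvG_perm_emit e)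
    (pvEmit_pairwise _ _ (PySem.List.pairwise_lt_enumerate _ _))).symm
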